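-- pv_equiv track=rewrite | github.com/thehalleyyoung/deppy | src/deppy/hybrid/discharge/llm_prover.py | _clean_proof
-- ===== SOURCE A (Python) =====
-- from typing import (
--
--     Any,
--     Callable,
--     Dict,
--     List,
--     Optional,
--     Sequence,
--     Tuple,
-- )
--
-- def _clean_proof(raw: str) -> Optional[str]:
--     """Strip boilerplate from a proof candidate."""
--     lines: List[str] = []
--     for line in raw.strip().splitlines():
--         stripped = line.rstrip()
--         # Skip comment-only lines at the start/end
--         if not lines and stripped.startswith("--"):
--             continue
--         # Skip "theorem ..." header
--         if stripped.startswith("theorem ") or stripped.startswith("lemma "):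
--             continue
--         # Skip "import" / "open"
--         if stripped.startswith("import ") or stripped.startswith("open "):
--             continue
--         lines.append(stripped)
--     # Remove trailing comment lines
--     while lines and lines[-1].strip().startswith("--"):
--         lines.pop()
--
--     result = "\n".join(lines).strip()
--     return result if result else None
-- ===== SOURCE B (Python) =====
-- def _clean_proof(raw):
--     """Strip boilerplate from a proof candidate."""
--     heads = ("theorem ", "lemma ", "import ", "open ")
--     filtered = [s for s in (line.rstrip() for line in raw.strip().splitlines())
--                 if not s.startswith(heads)]
--     left = 0
--     while left < len(filtered) and filtered[left].startswith("--"):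
--         left += 1
--     right = len(filtered)
--     while right > left and filtered[right - 1].strip().startswith("--"):
--         right -= 1
--     result = "\n".join(filtered[left:right]).strip()
--     return result or None
-- ===== Notes on version B (the rewrite author's own statement) =====
-- stated objective: simpler
-- what changed: Replaces A's single stateful accumulation pass (with its 'not lines' leading-comment flag and trailing pop loop) by a declarative filter of header lines followed by a two-ended index trim of leading/trailing comment lines and one slice.
import Mathlib
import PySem

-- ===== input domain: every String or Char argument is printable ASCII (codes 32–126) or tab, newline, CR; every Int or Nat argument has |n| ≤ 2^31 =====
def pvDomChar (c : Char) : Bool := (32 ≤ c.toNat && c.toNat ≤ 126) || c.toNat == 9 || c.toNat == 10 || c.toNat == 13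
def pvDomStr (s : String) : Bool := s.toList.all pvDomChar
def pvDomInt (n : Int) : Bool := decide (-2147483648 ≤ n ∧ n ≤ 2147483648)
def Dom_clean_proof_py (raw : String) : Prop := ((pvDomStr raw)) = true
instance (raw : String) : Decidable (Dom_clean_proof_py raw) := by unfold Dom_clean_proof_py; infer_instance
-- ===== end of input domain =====

-- B replaces A's stateful accumulation (with its "not lines" leading-comment flag and trailing pop loop)
-- by a filter pass followed by a two-ended index trim; objective: simpler.

-- ===== PORT A =====
-- 'while lines and lines[-1].strip().startswith("--"): lines.pop()'
def pvPopTrailing (lines : List String) : List String :=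
  match h : lines.getLast? with
  | some last =>
      if PySem.Str.startswith (PySem.Str.strip last) "--"
      then pvPopTrailing lines.dropLast
      else lines
  | none => lines
termination_by lines.length
decreasing_by
  cases lines with
  | nil => simp at h
  | cons x xs => simp [List.length_dropLast]

def clean_proof_py (raw : String) : Option String :=
  let lines := (PySem.Str.splitlines (PySem.Str.strip raw)).foldl
    (fun lines line =>
      let stripped := PySem.Str.rstrip line
      if lines.isEmpty && PySem.Str.startswith stripped "--" then lines
      else if PySem.Str.startswith stripped "theorem " || PySem.Str.startswith stripped "lemma " then lines
      else if PySem.Str.startswith stripped "import " || PySem.Str.startswith stripped "open " then lines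
      else lines ++ [stripped]) []
  let lines := pvPopTrailing lines
  let result := PySem.Str.strip (PySem.Str.join "\n" lines)
  if result ≠ "" then some result else none

-- ===== PORT B =====
def pvIsHead (s : String) : Bool :=
  PySem.Str.startswith s "theorem " || PySem.Str.startswith s "lemma " ||
  PySem.Str.startswith s "import " || PySem.Str.startswith s "open "

def pvLeftIdx (filtered : List String) (left : Nat) : Nat :=
  if left < filtered.length && PySem.Str.startswith (filtered.getD left "") "--"
  then pvLeftIdx filtered (left + 1) else left
termination_by filtered.length - left
decreasing_by
  rename_i h
  simp only [Bool.and_eq_true, decide_eq_true_eq] at h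
  omega

def pvRightIdx (filtered : List String) (left right : Nat) : Nat :=
  if left < right && PySem.Str.startswith (PySem.Str.strip (filtered.getD (right - 1) "")) "--"
  then pvRightIdx filtered left (right - 1) else right
termination_by right
decreasing_by
  rename_i h
  simp only [Bool.and_eq_true, decide_eq_true_eq] at h
  omega

def clean_proof_py_alt (raw : String) : Option String :=
  let filtered := ((PySem.Str.splitlines (PySem.Str.strip raw)).map PySem.Str.rstrip).filter
      (fun s => !pvIsHead s)
  let left := pvLeftIdx filtered 0
  let right := pvRightIdx filtered left filtered.length
  let result := PySem.Str.strip (PySem.Str.join "\n"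
      (PySem.List.slice filtered (some (left : Int)) (some (right : Int))))
  if result = "" then none else some result

-- ===== PRECONDITION & SPEC =====
def Spec_clean_proof_py (raw : String) (out : Option String) : Prop := out = clean_proof_py_alt raw
instance (raw : String) (out : Option String) : Decidable (Spec_clean_proof_py raw out) := by unfold Spec_clean_proof_py; infer_instance

-- ===== CLAIM (what is proved, stated in full; the proofs are below) =====
def Claim_equal_clean_proof_py : Prop := ∀ (raw : String), Dom_clean_proof_py raw → Spec_clean_proof_py raw (clean_proof_py raw)

-- ===== LEMMAS AND PROOFS =====

-- A's fold from a nonempty accumulator just appends the kept lines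
lemma foldA_nonempty (L : List String) (acc : List String) (hacc : acc ≠ []) :
    L.foldl (fun lines line =>
      let stripped := PySem.Str.rstrip line
      if lines.isEmpty && PySem.Str.startswith stripped "--" then lines
      else if PySem.Str.startswith stripped "theorem " || PySem.Str.startswith stripped "lemma " then lines
      else if PySem.Str.startswith stripped "import " || PySem.Str.startswith stripped "open " then lines
      else lines ++ [stripped]) acc
    = acc ++ (L.map PySem.Str.rstrip).filter (fun s => !pvIsHead s) := by
  induction L generalizing acc with
  | nil => simp
  | cons l L ih =>
    simp at ih
    by_cases ha : PySem.Chars.startswith (PySem.Chars.rstrip l.toList) ['t','h','e','o','r','e','m',' '] = true <;>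
    by_cases hb : PySem.Chars.startswith (PySem.Chars.rstrip l.toList) ['l','e','m','m','a',' '] = true <;>
    by_cases hc : PySem.Chars.startswith (PySem.Chars.rstrip l.toList) ['i','m','p','o','r','t',' '] = true <;>
    by_cases hd : PySem.Chars.startswith (PySem.Chars.rstrip l.toList) ['o','p','e','n',' '] = true <;>
      simp [pvIsHead, hacc, ha, hb, hc, hd, ih]

-- A's fold from [] is dropWhile-comment of the filtered list
lemma foldA_nil (L : List String) :
    L.foldl (fun lines line =>
      let stripped := PySem.Str.rstrip line
      if lines.isEmpty && PySem.Str.startswith stripped "--" then lines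
      else if PySem.Str.startswith stripped "theorem " || PySem.Str.startswith stripped "lemma " then lines
      else if PySem.Str.startswith stripped "import " || PySem.Str.startswith stripped "open " then lines
      else lines ++ [stripped]) []
    = ((L.map PySem.Str.rstrip).filter (fun s => !pvIsHead s)).dropWhile
        (fun s => PySem.Str.startswith s "--") := by
  induction L with
  | nil => rfl
  | cons l L ih =>
    simp at ih
    have hne := foldA_nonempty L [PySem.Str.rstrip l] (by simp)
    simp at hne
    by_cases hcmt : PySem.Chars.startswith (PySem.Chars.rstrip l.toList) ['-','-'] = true <;>
    by_cases ha : PySem.Chars.startswith (PySem.Chars.rstrip l.toList) ['t','h','e','o','r','e','m',' '] = true <;>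
      by_cases hb : PySem.Chars.startswith (PySem.Chars.rstrip l.toList) ['l','e','m','m','a',' '] = true <;>
      by_cases hc : PySem.Chars.startswith (PySem.Chars.rstrip l.toList) ['i','m','p','o','r','t',' '] = true <;>
      by_cases hd : PySem.Chars.startswith (PySem.Chars.rstrip l.toList) ['o','p','e','n',' '] = true <;>
      simp [pvIsHead, hcmt, ha, hb, hc, hd, ih, hne]

lemma drop_length_takeWhile {α : Type} (p : α → Bool) (l : List α) :
    l.drop (l.takeWhile p).length = l.dropWhile p := by
  induction l with
  | nil => rfl
  | cons x xs ih =>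
    by_cases h : p x = true
    · simp [h, ih]
    · simp [h]

lemma pvPopTrailing_nil : pvPopTrailing [] = [] := by
  rw [pvPopTrailing.eq_def]
  split
  · rename_i last hlast
    simp at hlast
  · rfl

lemma pvPopTrailing_last (l : List String) (x : String) (hx : l.getLast? = some x) :
    pvPopTrailing l
      = if PySem.Str.startswith (PySem.Str.strip x) "--"
        then pvPopTrailing l.dropLast else l := by
  rw [pvPopTrailing.eq_def]
  split
  · rename_i last hlast
    rw [hx] at hlast
    cases hlast
    rfl
  · rename_i hnone
    rw [hx] at hnone
    cases hnone

lemma pvLeftIdx_spec_aux (filtered : List String) :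
    ∀ n k, filtered.length - k ≤ n →
      pvLeftIdx filtered k
        = k + ((filtered.drop k).takeWhile (fun s => PySem.Str.startswith s "--")).length := by
  intro n
  induction n with
  | zero =>
    intro k hk
    have hlen : filtered.length ≤ k := by omega
    rw [pvLeftIdx.eq_def, if_neg (by simp [Nat.not_lt.mpr hlen])]
    simp [List.drop_of_length_le hlen]
  | succ n ih =>
    intro k hk
    by_cases hlt : k < filtered.length
    · have hgd0 : filtered.getD k "" = filtered[k] := List.getD_eq_getElem _ _ hlt
      have hdk : filtered.drop k = filtered[k] :: filtered.drop (k + 1) :=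
        List.drop_eq_getElem_cons hlt
      by_cases hc : PySem.Str.startswith filtered[k] "--" = true
      · rw [pvLeftIdx.eq_def,
          if_pos (by simp only [Bool.and_eq_true, decide_eq_true_eq]; rw [hgd0]; exact ⟨hlt, hc⟩)]
        rw [ih (k + 1) (by omega), hdk]
        simp only [List.takeWhile_cons]
        rw [if_pos hc]
        simp only [List.length_cons]
        omega
      · rw [pvLeftIdx.eq_def,
          if_neg (by simp only [Bool.and_eq_true, decide_eq_true_eq, not_and]; intro _; rw [hgd0]; exact hc)]
        rw [hdk]
        simp only [List.takeWhile_cons]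
        rw [if_neg hc]
        simp
    · rw [pvLeftIdx.eq_def, if_neg (by simp [hlt])]
      simp [List.drop_of_length_le (by omega : filtered.length ≤ k)]

lemma pvLeftIdx_spec (filtered : List String) :
    pvLeftIdx filtered 0
      = (filtered.takeWhile (fun s => PySem.Str.startswith s "--")).length := by
  simpa using pvLeftIdx_spec_aux filtered filtered.length 0 (by omega)

lemma pvRightIdx_spec (filtered : List String) (left : Nat) :
    ∀ right, left ≤ right → right ≤ filtered.length →
      left ≤ pvRightIdx filtered left right ∧
      (filtered.drop left).take (pvRightIdx filtered left right - left)
        = pvPopTrailing ((filtered.drop left).take (right - left)) := by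
  intro right
  induction right using Nat.strong_induction_on with
  | _ right ih =>
    intro hlr hrl
    by_cases hlt : left < right
    · have hr1 : right - 1 < filtered.length := by omega
      have hgd0 : filtered.getD (right - 1) "" = filtered[right - 1] :=
        List.getD_eq_getElem _ _ hr1
      have hseglen : ((filtered.drop left).take (right - left)).length = right - left := by
        simp
        omega
      have hlast : ((filtered.drop left).take (right - left)).getLast?
          = some filtered[right - 1] := by
        rw [List.getLast?_eq_getElem?, hseglen]
        rw [List.getElem?_take_of_lt (by omega)]
        rw [List.getElem?_drop]
        rw [List.getElem?_eq_getElem (by omega : left + (right - left - 1) < filtered.length)]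
        congr 1
        congr 1
        omega
      have hdl : ((filtered.drop left).take (right - left)).dropLast
          = (filtered.drop left).take (right - 1 - left) := by
        rw [List.dropLast_eq_take, hseglen, List.take_take]
        congr 1
        omega
      by_cases hc : PySem.Str.startswith (PySem.Str.strip filtered[right - 1]) "--" = true
      · rw [pvRightIdx.eq_def,
          if_pos (by simp only [Bool.and_eq_true, decide_eq_true_eq]; rw [hgd0]; exact ⟨hlt, hc⟩)]
        obtain ⟨ih1, ih2⟩ := ih (right - 1) (by omega) (by omega) (by omega)
        refine ⟨ih1, ?_⟩
        rw [ih2, pvPopTrailing_last _ _ hlast, if_pos hc, hdl]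
      · rw [pvRightIdx.eq_def,
          if_neg (by simp only [Bool.and_eq_true, decide_eq_true_eq, not_and]; intro _; rw [hgd0]; exact hc)]
        refine ⟨hlr, ?_⟩
        rw [pvPopTrailing_last _ _ hlast, if_neg hc]
    · have hEq : left = right := by omega
      rw [pvRightIdx.eq_def, if_neg (by simp [hlt])]
      refine ⟨hlr, ?_⟩
      subst hEq
      simp only [Nat.sub_self, List.take_zero]
      rw [pvPopTrailing_nil]

-- ===== VERDICT (by name: the statement is the Claim_ definition above) =====
theorem clean_proof_py_spec : Claim_equal_clean_proof_py := by
  intro raw _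
  unfold Spec_clean_proof_py
  simp only [clean_proof_py, clean_proof_py_alt]
  rw [foldA_nil]
  set filtered := ((PySem.Str.splitlines (PySem.Str.strip raw)).map PySem.Str.rstrip).filter
      (fun s => !pvIsHead s) with hf
  have hleft := pvLeftIdx_spec filtered
  have hll : pvLeftIdx filtered 0 ≤ filtered.length := by
    rw [hleft]
    exact (List.takeWhile_sublist _).length_le
  obtain ⟨hge, hseg⟩ := pvRightIdx_spec filtered (pvLeftIdx filtered 0) filtered.length hll le_rfl
  rw [PySem.List.slice_natCast, hseg]
  have htake : (filtered.drop (pvLeftIdx filtered 0)).take (filtered.length - pvLeftIdx filtered 0)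
      = filtered.drop (pvLeftIdx filtered 0) := by
    apply List.take_of_length_le
    simp
  rw [htake]
  have hdrop : filtered.drop (pvLeftIdx filtered 0)
      = filtered.dropWhile (fun s => PySem.Str.startswith s "--") := by
    rw [hleft]
    exact drop_length_takeWhile _ _
  rw [hdrop]
  by_cases h : PySem.Str.strip (PySem.Str.join "\n"
      (pvPopTrailing (filtered.dropWhile (fun s => PySem.Str.startswith s "--")))) = "" <;>
    simp [h]
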